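-- pv_equiv track=rewrite | github.com/sohamchitalia/CSCI561_FOLResolution | hwassg3.py | makingkb
-- ===== SOURCE A (Python) =====
-- def makingkb(kb, dc):
--     # predsdict = dict()
--     for sentence in kb:
--         clauses = sentence.split(" | ")
--         for clause in clauses:
--             predicate = clause.split("(")[0]
--             if predicate in dc.keys():
--                 if sentence not in dc[predicate]:
--                     dc[predicate].append(sentence)
--             else:
--                 dc[predicate] = [sentence]
--     return dc
-- ===== SOURCE B (Python) =====
-- def makingkb(kb, dc):
--     collected = {}
--     for sentence in kb:
--         for clause in sentence.split(" | "):
--             collected.setdefault(clause.split("(")[0], []).append(sentence)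
--     for predicate, sentences in collected.items():
--         if predicate in dc:
--             lst = dc[predicate]
--             seen = set(lst)
--             for s in sentences:
--                 if s not in seen:
--                     seen.add(s)
--                     lst.append(s)
--         else:
--             dc[predicate] = list(dict.fromkeys(sentences))
--     return dc
-- ===== Notes on version B (the rewrite author's own statement) =====
-- stated objective: alternative
-- what changed: Replaces A's single pass with interleaved membership-scan updates by two phases: first group all (predicate, sentence) pairs into an index with no membership checks, then merge each predicate's collected list into dc with a one-shot seen-set dedup (dict.fromkeys for new predicates).
import Mathlib
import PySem

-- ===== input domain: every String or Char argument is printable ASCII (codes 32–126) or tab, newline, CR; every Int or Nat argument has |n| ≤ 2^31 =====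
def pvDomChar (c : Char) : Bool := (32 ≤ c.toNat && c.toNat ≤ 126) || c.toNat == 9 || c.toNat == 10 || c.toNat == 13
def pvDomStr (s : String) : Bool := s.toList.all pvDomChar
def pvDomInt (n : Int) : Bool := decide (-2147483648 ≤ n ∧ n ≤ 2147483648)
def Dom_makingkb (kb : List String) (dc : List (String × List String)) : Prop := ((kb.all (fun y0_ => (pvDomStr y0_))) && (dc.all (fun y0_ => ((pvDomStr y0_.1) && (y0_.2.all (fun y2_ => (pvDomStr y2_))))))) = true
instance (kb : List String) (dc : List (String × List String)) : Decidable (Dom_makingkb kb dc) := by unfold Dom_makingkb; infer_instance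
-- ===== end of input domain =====

-- B replaces A's interleaved per-clause membership-scan updates by a two-phase plan:
-- group all (predicate, sentence) pairs first, then merge each group into dc with one dedup pass.
-- Both Pythons mutate dc in place; the equivalence proved here is about the returned value.

-- ===== PORT A =====
-- sentence.split(" | "): the separator is nonempty, so split? is always `some`
def pvClauses (s : String) : List String := (PySem.Str.split? s " | ").getD []
-- clause.split("(")[0]: split? with a nonempty separator never returns none or [], so [0] cannot raise
def pvPred (clause : String) : String := ((PySem.Str.split? clause "(").getD []).headD ""

def pvAStep (sentence : String) (dc : PySem.Dict String (List String)) (clause : String) :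
    PySem.Dict String (List String) :=
  let predicate := pvPred clause
  match dc.get? predicate with
  | some l => if sentence ∈ l then dc else dc.insert predicate (l ++ [sentence])
  | none   => dc.insert predicate [sentence]

def makingkb (kb : List String) (dc : List (String × List String)) : List (String × List String) :=
  (kb.foldl (fun d sentence => (pvClauses sentence).foldl (pvAStep sentence) d)
    (PySem.Dict.mk dc)).items

-- ===== PORT B =====
-- collected.setdefault(predicate, []).append(sentence)
def pvGStep (sentence : String) (coll : PySem.Dict String (List String)) (clause : String) :
    PySem.Dict String (List String) :=
  let predicate := pvPred clause
  coll.insert predicate ((coll.getD predicate []) ++ [sentence])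

-- the seen-set dedup loop of B's merge phase
def pvDedupInto (seen : PySem.Set String) (lst : List String) (sentences : List String) : List String :=
  (sentences.foldl
    (fun (st : PySem.Set String × List String) s =>
      if PySem.Set.contains st.1 s then st else (PySem.Set.add st.1 s, st.2 ++ [s]))
    (seen, lst)).2

def makingkb_alt (kb : List String) (dc : List (String × List String)) : List (String × List String) :=
  let collected :=
    kb.foldl (fun coll sentence => (pvClauses sentence).foldl (pvGStep sentence) coll)
      PySem.Dict.empty
  (collected.items.foldl
    (fun (d : PySem.Dict String (List String)) pr =>
      match d.get? pr.1 with
      | some lst => d.insert pr.1 (pvDedupInto (PySem.Set.ofList lst) lst pr.2)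
      | none     => d.insert pr.1 (PySem.List.dedup pr.2))
    (PySem.Dict.mk dc)).items

-- ===== PRECONDITION & SPEC =====
-- Pre_ excludes only association lists dc with duplicate keys: those represent no Python dict
-- (a dict cannot have two equal keys), so A is never run on them.
def Pre_makingkb (kb : List String) (dc : List (String × List String)) : Prop :=
  (dc.map Prod.fst).Nodup
instance (kb : List String) (dc : List (String × List String)) : Decidable (Pre_makingkb kb dc) := by
  unfold Pre_makingkb; infer_instance

def pvWitness_makingkb : List String × (List (String × List String)) :=
  (["P(x) | Q(y)", "P(x)"], [("Q", ["Q(a)"])])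

def Spec_makingkb (kb : List String) (dc : List (String × List String)) (out : List (String × List String)) : Prop := out = makingkb_alt kb dc
instance (kb : List String) (dc : List (String × List String)) (out : List (String × List String)) : Decidable (Spec_makingkb kb dc out) := by unfold Spec_makingkb; infer_instance

-- ===== CLAIM (what is proved, stated in full; the proofs are below) =====
def Claim_equal_makingkb : Prop := ∀ (kb : List String) (dc : List (String × List String)), Dom_makingkb kb dc → Pre_makingkb kb dc → Spec_makingkb kb dc (makingkb kb dc)

-- ===== LEMMAS AND PROOFS =====

-- pair-level step functions (proof-side abstractions of the two ports' loop bodies)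
def pst (d : PySem.Dict String (List String)) (pr : String × String) : PySem.Dict String (List String) :=
  match d.get? pr.1 with
  | some l => if pr.2 ∈ l then d else d.insert pr.1 (l ++ [pr.2])
  | none   => d.insert pr.1 [pr.2]

def gst (coll : PySem.Dict String (List String)) (pr : String × String) : PySem.Dict String (List String) :=
  coll.insert pr.1 ((coll.getD pr.1 []) ++ [pr.2])

def pairsOf (kb : List String) : List (String × String) :=
  kb.flatMap (fun s => (pvClauses s).map (fun c => (pvPred c, s)))

def flatPairs (items : List (String × List String)) : List (String × String) :=
  items.flatMap (fun pr => pr.2.map (fun s => (pr.1, s)))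

def dApp (cur : List String) (ss : List String) : List String :=
  ss.foldl (fun c s => if s ∈ c then c else c ++ [s]) cur

theorem foldA_eq_pst (kb : List String) :
    ∀ d : PySem.Dict String (List String),
      kb.foldl (fun d sentence => (pvClauses sentence).foldl (pvAStep sentence) d) d
        = (pairsOf kb).foldl pst d := by
  induction kb with
  | nil => intro d; rfl
  | cons a t ih =>
    intro d
    simp only [List.foldl_cons, pairsOf, List.flatMap_cons, List.foldl_append]
    have h1 : (pvClauses a).foldl (pvAStep a) d
        = ((pvClauses a).map (fun c => (pvPred c, a))).foldl pst d := by
      rw [List.foldl_map]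
      have : (fun (d : PySem.Dict String (List String)) c => pst d (pvPred c, a)) = pvAStep a := by
        funext d c; simp [pvAStep, pst]
      rw [this]
    rw [h1]
    exact ih _

theorem makingkb_eq_pst (kb : List String) (dc : List (String × List String)) :
    makingkb kb dc = ((pairsOf kb).foldl pst (PySem.Dict.mk dc)).items := by
  unfold makingkb
  rw [foldA_eq_pst]

theorem foldG_eq_gst (kb : List String) :
    ∀ coll : PySem.Dict String (List String),
      kb.foldl (fun coll sentence => (pvClauses sentence).foldl (pvGStep sentence) coll) coll
        = (pairsOf kb).foldl gst coll := by
  induction kb with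
  | nil => intro coll; rfl
  | cons a t ih =>
    intro coll
    simp only [List.foldl_cons, pairsOf, List.flatMap_cons, List.foldl_append]
    have h1 : (pvClauses a).foldl (pvGStep a) coll
        = ((pvClauses a).map (fun c => (pvPred c, a))).foldl gst coll := by
      rw [List.foldl_map]
      have : (fun (d : PySem.Dict String (List String)) c => gst d (pvPred c, a)) = pvGStep a := by
        funext d c; simp [pvGStep, gst]
      rw [this]
    rw [h1]
    exact ih _

-- keys facts
theorem nodup_keys_pst (d : PySem.Dict String (List String)) (pr : String × String)
    (h : d.keys.Nodup) : (pst d pr).keys.Nodup := by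
  unfold pst
  rcases hg : d.get? pr.1 with _ | l
  · exact PySem.Dict.nodup_keys_insert _ _ _ h
  · dsimp only
    split
    · exact h
    · exact PySem.Dict.nodup_keys_insert _ _ _ h

theorem nodup_keys_foldl_pst (l : List (String × String)) :
    ∀ d : PySem.Dict String (List String), d.keys.Nodup → (l.foldl pst d).keys.Nodup := by
  induction l with
  | nil => exact fun d h => h
  | cons x t ih => exact fun d h => ih _ (nodup_keys_pst d x h)

theorem mem_keys_pst (d : PySem.Dict String (List String)) (pr : String × String)
    (p : String) (h : p ∈ d.keys) : p ∈ (pst d pr).keys := by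
  unfold pst
  rcases hg : d.get? pr.1 with _ | l
  · exact (PySem.Dict.mem_keys_insert _ _ _ _).mpr (Or.inr h)
  · dsimp only
    split
    · exact h
    · exact (PySem.Dict.mem_keys_insert _ _ _ _).mpr (Or.inr h)

theorem mem_keys_pst_self (d : PySem.Dict String (List String)) (pr : String × String) :
    pr.1 ∈ (pst d pr).keys := by
  unfold pst
  rcases hg : d.get? pr.1 with _ | l
  · exact (PySem.Dict.mem_keys_insert _ _ _ _).mpr (Or.inl rfl)
  · dsimp only
    split
    · rw [← PySem.Dict.contains_iff_mem_keys, PySem.Dict.contains_eq_isSome_get?, hg]; rfl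
    · exact (PySem.Dict.mem_keys_insert _ _ _ _).mpr (Or.inl rfl)

theorem map_overwrite_id (l : List (String × List String)) (p : String) (cur : List String)
    (hnd : (l.map Prod.fst).Nodup)
    (h : l.find? (fun pr => pr.1 == p) = some (p, cur)) :
    l.map (fun pr => if (pr.1 == p) = true then (p, cur) else pr) = l := by
  induction l with
  | nil => simp at h
  | cons a t ih =>
    simp only [List.map_cons, List.nodup_cons] at hnd
    by_cases hap : a.1 = p
    · rw [List.find?_cons_of_pos (by simpa using hap)] at h
      have ha : a = (p, cur) := by injection h
      rw [List.map_cons, if_pos (by simpa using hap)]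
      rw [show ((p, cur) : String × List String) :: t.map (fun pr => if (pr.1 == p) = true then (p, cur) else pr) = _ from rfl]
      congr 1
      · exact ha.symm
      have hnp : ∀ x ∈ t, ¬(x.1 == p) = true := by
        intro x hx hbeq
        apply hnd.1
        rw [hap, ← (by simpa using hbeq : x.1 = p)]
        exact List.mem_map_of_mem hx
      calc t.map (fun pr => if (pr.1 == p) = true then (p, cur) else pr)
          = t.map (fun pr => pr) := List.map_congr_left (fun x hx => if_neg (hnp x hx))
        _ = t := by simp
    · rw [List.find?_cons_of_neg (by simpa using hap)] at h
      rw [List.map_cons, if_neg (by simpa using hap)]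
      rw [ih hnd.2 h]

-- insert with the value already there is the identity (nodup keys)
theorem insert_get?_self (d : PySem.Dict String (List String)) (p : String) (cur : List String)
    (hnd : d.keys.Nodup) (h : d.get? p = some cur) : d.insert p cur = d := by
  have hc : d.contains p = true := by
    rw [PySem.Dict.contains_eq_isSome_get?, h]; rfl
  apply PySem.Dict.ext
  rw [PySem.Dict.items_insert, if_pos hc]
  simp only [PySem.Dict.get?] at h
  obtain ⟨x, hfind, hx2⟩ := Option.map_eq_some_iff.mp h
  have hx1 : x.1 = p := by simpa using List.find?_some hfind
  have hx : x = (p, cur) := by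
    obtain ⟨x1, x2⟩ := x; simp_all
  rw [hx] at hfind
  simp only [PySem.Dict.keys] at hnd
  exact map_overwrite_id d.items p cur hnd hfind

-- two inserts at distinct keys commute when the first key already exists
theorem insert_comm_of_contains (d : PySem.Dict String (List String)) (p q : String)
    (a b : List String) (hne : q ≠ p) (hp : p ∈ d.keys) :
    (d.insert q b).insert p a = (d.insert p a).insert q b := by
  have hpc : d.contains p = true := (PySem.Dict.contains_iff_mem_keys _ _).mpr hp
  have hpc' : ∀ v : List String, (d.insert q v).contains p = true := by
    intro v
    rw [(PySem.Dict.contains_iff_mem_keys _ _ : _ ↔ p ∈ (d.insert q v).keys)]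
    exact (PySem.Dict.mem_keys_insert _ _ _ _).mpr (Or.inr hp)
  apply PySem.Dict.ext
  by_cases hqc : d.contains q = true
  · have hqc' : (d.insert p a).contains q = true := by
      rw [PySem.Dict.contains_iff_mem_keys] at hqc ⊢
      exact (PySem.Dict.mem_keys_insert _ _ _ _).mpr (Or.inr hqc)
    rw [PySem.Dict.items_insert, if_pos (hpc' b), PySem.Dict.items_insert, if_pos hqc,
        PySem.Dict.items_insert, if_pos hqc', PySem.Dict.items_insert, if_pos hpc]
    rw [List.map_map, List.map_map]
    apply List.map_congr_left
    intro x _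
    simp only [Function.comp_apply]
    obtain ⟨x1, x2⟩ := x
    by_cases hxp : x1 = p
    · subst hxp
      have : ¬ x1 = q := fun hh => hne (hh.symm.trans rfl)
      simp [this, hne]
    · by_cases hxq : x1 = q
      · subst hxq
        simp [hxp, hne]
      · simp [hxp, hxq]
  · have hqc' : ¬ (d.insert p a).contains q = true := by
      intro hcon
      rw [PySem.Dict.contains_iff_mem_keys] at hcon
      rcases (PySem.Dict.mem_keys_insert _ _ _ _).mp hcon with h | h
      · exact hne h
      · exact hqc ((PySem.Dict.contains_iff_mem_keys _ _).mpr h)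
    rw [PySem.Dict.items_insert, if_pos (hpc' b), PySem.Dict.items_insert, if_neg hqc,
        PySem.Dict.items_insert, if_neg hqc', PySem.Dict.items_insert, if_pos hpc]
    rw [List.map_append]
    simp only [List.map_cons, List.map_nil]
    rw [if_neg (by simpa using hne)]

-- branch equations for pst
theorem pst_of_some_mem (d : PySem.Dict String (List String)) (pr : String × String)
    (l : List String) (h : d.get? pr.1 = some l) (hm : pr.2 ∈ l) : pst d pr = d := by
  unfold pst; rw [h]; simp [hm]

theorem pst_of_some_not_mem (d : PySem.Dict String (List String)) (pr : String × String)
    (l : List String) (h : d.get? pr.1 = some l) (hm : pr.2 ∉ l) :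
    pst d pr = d.insert pr.1 (l ++ [pr.2]) := by
  unfold pst; rw [h]; simp [hm]

theorem pst_of_none (d : PySem.Dict String (List String)) (pr : String × String)
    (h : d.get? pr.1 = none) : pst d pr = d.insert pr.1 [pr.2] := by
  unfold pst; rw [h]

theorem get?_pst_of_ne (d : PySem.Dict String (List String)) (pr : String × String)
    (r : String) (hne : r ≠ pr.1) : (pst d pr).get? r = d.get? r := by
  unfold pst
  rcases hg : d.get? pr.1 with _ | l
  · exact PySem.Dict.get?_insert_of_ne _ _ hne
  · dsimp only
    split
    · rfl
    · exact PySem.Dict.get?_insert_of_ne _ _ hne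

-- single swap: pst at an existing key commutes with pst at a different key
theorem pst_swap (d : PySem.Dict String (List String)) (p q : String) (s t : String)
    (hne : q ≠ p) (hp : p ∈ d.keys) :
    pst (pst d (q, t)) (p, s) = pst (pst d (p, s)) (q, t) := by
  have hps : ((d.get? p).isSome : Prop) := by
    rw [← PySem.Dict.contains_eq_isSome_get?]
    exact (PySem.Dict.contains_iff_mem_keys _ _).mpr hp
  obtain ⟨lp, hlp⟩ := Option.isSome_iff_exists.mp hps
  have hlp' : (pst d (q, t)).get? p = some lp := by
    rw [get?_pst_of_ne _ _ _ (Ne.symm hne), hlp]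
  by_cases hs : s ∈ lp
  · rw [pst_of_some_mem _ (p, s) lp hlp' hs, pst_of_some_mem _ (p, s) lp hlp hs]
  · rw [pst_of_some_not_mem _ (p, s) lp hlp' hs, pst_of_some_not_mem _ (p, s) lp hlp hs]
    have hq' : (d.insert p (lp ++ [s])).get? q = d.get? q :=
      PySem.Dict.get?_insert_of_ne _ _ hne
    rcases hq : d.get? q with _ | lq
    · rw [pst_of_none _ (q, t) (hq'.trans hq), pst_of_none _ (q, t) hq]
      exact insert_comm_of_contains d p q (lp ++ [s]) [t] hne hp
    · by_cases ht : t ∈ lq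
      · rw [pst_of_some_mem _ (q, t) lq (hq'.trans hq) ht, pst_of_some_mem _ (q, t) lq hq ht]
      · rw [pst_of_some_not_mem _ (q, t) lq (hq'.trans hq) ht,
            pst_of_some_not_mem _ (q, t) lq hq ht]
        exact insert_comm_of_contains d p q (lp ++ [s]) (lq ++ [t]) hne hp

-- pst at a different key commutes past a whole key-p block
theorem pst_comm_block (lp : List (String × String)) (p q t : String)
    (hne : q ≠ p) (hall : ∀ x ∈ lp, x.1 = p) :
    ∀ d : PySem.Dict String (List String), p ∈ d.keys →
      lp.foldl pst (pst d (q, t)) = pst (lp.foldl pst d) (q, t) := by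
  induction lp with
  | nil => intro d _; rfl
  | cons x r ih =>
    intro d hp
    have hx1 : x.1 = p := hall x List.mem_cons_self
    simp only [List.foldl_cons]
    have hx : x = (p, x.2) := by rw [← hx1]
    rw [hx, pst_swap d p q x.2 t hne hp, ← hx]
    exact ih (fun y hy => hall y (List.mem_cons_of_mem _ hy)) (pst d x)
      (hx1 ▸ mem_keys_pst_self d x)

-- stable partition at key p
theorem pst_partition (l : List (String × String)) (p : String) :
    ∀ d : PySem.Dict String (List String), p ∈ d.keys →
      l.foldl pst d
        = (l.filter (fun x => !(x.1 == p))).foldl pst ((l.filter (fun x => x.1 == p)).foldl pst d) := by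
  induction l with
  | nil => intro d _; rfl
  | cons x r ih =>
    intro d hp
    by_cases hx : x.1 = p
    · rw [List.filter_cons_of_pos (by simpa using hx), List.filter_cons_of_neg (by simpa using hx)]
      simp only [List.foldl_cons]
      exact ih (pst d x) (mem_keys_pst d x p hp)
    · rw [List.filter_cons_of_neg (by simpa using hx), List.filter_cons_of_pos (by simpa using hx)]
      simp only [List.foldl_cons]
      rw [ih (pst d x) (mem_keys_pst d x p hp)]
      have hall : ∀ y ∈ r.filter (fun x => x.1 == p), y.1 = p := by
        intro y hy
        simpa using (List.mem_filter.mp hy).2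
      have hx' : x = (x.1, x.2) := rfl
      rw [hx', pst_comm_block _ p x.1 x.2 hx hall d hp, ← hx']

-- gst on a dict headed by a different key passes the head through
theorem gst_mk_cons (coll : PySem.Dict String (List String)) (p q : String) (v : List String)
    (t : String) (hne : q ≠ p) :
    gst (PySem.Dict.mk ((p, v) :: coll.items)) (q, t)
      = PySem.Dict.mk ((p, v) :: (gst coll (q, t)).items) := by
  have hget : (PySem.Dict.mk ((p, v) :: coll.items)).get? q = coll.get? q := by
    rw [PySem.Dict.get?_mk_cons, if_neg (by simpa using Ne.symm hne)]
  have hcon : (PySem.Dict.mk ((p, v) :: coll.items)).contains q = coll.contains q := by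
    simp only [PySem.Dict.contains, List.any_cons]
    simp [Ne.symm hne]
  unfold gst
  dsimp only
  apply PySem.Dict.ext
  rw [PySem.Dict.items_insert, PySem.Dict.items_insert, hcon]
  simp only [PySem.Dict.getD, hget]
  by_cases hq : coll.contains q = true
  · rw [if_pos hq, if_pos hq]
    simp only [List.map_cons]
    rw [if_neg (by simpa using Ne.symm hne)]
  · rw [if_neg hq, if_neg hq]
    simp

-- gst at the head key appends to the head value (no key p below)
theorem gst_mk_cons_self (coll : PySem.Dict String (List String)) (p : String) (v : List String)
    (t : String) (hp : p ∉ coll.keys) :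
    gst (PySem.Dict.mk ((p, v) :: coll.items)) (p, t)
      = PySem.Dict.mk ((p, v ++ [t]) :: coll.items) := by
  have hget : (PySem.Dict.mk ((p, v) :: coll.items)).get? p = some v := by
    rw [PySem.Dict.get?_mk_cons, if_pos (by simp)]
  have hcon : (PySem.Dict.mk ((p, v) :: coll.items)).contains p = true := by
    rw [PySem.Dict.contains_eq_isSome_get?, hget]; rfl
  unfold gst
  dsimp only
  apply PySem.Dict.ext
  rw [PySem.Dict.items_insert, if_pos hcon]
  simp only [PySem.Dict.getD, hget, Option.getD_some]
  simp only [List.map_cons, if_pos (show ((p : String) == p) = true by simp)]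
  congr 1
  have hnp : ∀ x ∈ coll.items, ¬(x.1 == p) = true := by
    intro x hx hbeq
    apply hp
    rw [← (by simpa using hbeq : x.1 = p)]
    exact List.mem_map_of_mem hx
  calc coll.items.map (fun x => if (x.1 == p) = true then (p, v ++ [t]) else x)
      = coll.items.map (fun x => x) := List.map_congr_left (fun x hx => if_neg (hnp x hx))
    _ = coll.items := by simp

-- gather head structure
theorem gather_head (l : List (String × String)) (p : String) :
    ∀ (coll : PySem.Dict String (List String)) (v : List String), p ∉ coll.keys →
      l.foldl gst (PySem.Dict.mk ((p, v) :: coll.items))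
        = PySem.Dict.mk ((p, v ++ (l.filter (fun x => x.1 == p)).map Prod.snd)
            :: ((l.filter (fun x => !(x.1 == p))).foldl gst coll).items) := by
  induction l with
  | nil => intro coll v _; simp
  | cons x r ih =>
    intro coll v hp
    by_cases hx : x.1 = p
    · have hx' : x = (p, x.2) := by rw [← hx]
      rw [List.foldl_cons, hx', gst_mk_cons_self coll p v x.2 hp, ih coll (v ++ [x.2]) hp]
      rw [List.filter_cons_of_pos (by simpa using hx), List.filter_cons_of_neg (by simpa using hx)]
      simp
    · have hx' : x = (x.1, x.2) := rfl
      rw [List.foldl_cons, hx', gst_mk_cons coll p x.1 v x.2 hx, ← hx']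
      have hp' : p ∉ (gst coll x).keys := by
        intro hmem
        unfold gst at hmem
        rcases (PySem.Dict.mem_keys_insert _ _ _ _).mp hmem with h | h
        · exact hx h.symm
        · exact hp h
      rw [ih (gst coll x) v hp']
      rw [List.filter_cons_of_neg (by simpa using hx), List.filter_cons_of_pos (by simpa using hx)]
      simp

-- gather never stores an empty list
theorem gather_values_nonempty (l : List (String × String)) :
    ∀ coll : PySem.Dict String (List String),
      (∀ pr ∈ coll.items, pr.2 ≠ []) →
      ∀ pr ∈ (l.foldl gst coll).items, pr.2 ≠ [] := by
  induction l with
  | nil => exact fun coll h => h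
  | cons x r ih =>
    intro coll h
    refine ih (gst coll x) ?_
    intro pr hpr
    unfold gst at hpr
    rcases (PySem.Dict.mem_items_insert _ _ _ _).mp hpr with h1 | h1
    · rw [h1]; simp
    · exact h pr h1.1

-- folding pst over one key's sentences = one dedup-append insert
theorem pst_block_eq_insert (ss : List String) (p : String) :
    ∀ (d : PySem.Dict String (List String)) (cur : List String),
      d.keys.Nodup → d.get? p = some cur →
      (ss.map (fun s => (p, s))).foldl pst d = d.insert p (dApp cur ss) := by
  induction ss with
  | nil =>
    intro d cur hnd hget
    exact (insert_get?_self d p cur hnd hget).symm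
  | cons a r ih =>
    intro d cur hnd hget
    simp only [List.map_cons, List.foldl_cons]
    by_cases hm : a ∈ cur
    · rw [pst_of_some_mem d (p, a) cur hget hm, ih d cur hnd hget]
      congr 1
      simp [dApp, hm]
    · rw [pst_of_some_not_mem d (p, a) cur hget hm,
          ih (d.insert p (cur ++ [a])) (cur ++ [a])
            (PySem.Dict.nodup_keys_insert _ _ _ hnd) (PySem.Dict.get?_insert_self _ _ _),
          PySem.Dict.insert_insert_self]
      congr 1
      simp [dApp, hm]

-- the seen-set loop computes dApp
theorem dedupInto_eq_dApp (ss : List String) :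
    ∀ (seen : PySem.Set String) (cur : List String),
      (∀ x, PySem.Set.contains seen x = true ↔ x ∈ cur) →
      pvDedupInto seen cur ss = dApp cur ss := by
  induction ss with
  | nil => intro seen cur _; rfl
  | cons a r ih =>
    intro seen cur hinv
    have hstep : pvDedupInto seen cur (a :: r)
        = if PySem.Set.contains seen a = true then pvDedupInto seen cur r
          else pvDedupInto (PySem.Set.add seen a) (cur ++ [a]) r := by
      unfold pvDedupInto
      simp only [List.foldl_cons]
      split <;> rfl
    have hstep2 : dApp cur (a :: r) = if a ∈ cur then dApp cur r else dApp (cur ++ [a]) r := by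
      simp only [dApp, List.foldl_cons]
      split <;> rfl
    rw [hstep, hstep2]
    by_cases hm : a ∈ cur
    · rw [if_pos ((hinv a).mpr hm), if_pos hm]
      exact ih seen cur hinv
    · have hca : ¬ PySem.Set.contains seen a = true := fun hc => hm ((hinv a).mp hc)
      rw [if_neg hca, if_neg hm]
      refine ih _ _ ?_
      intro x
      simp only [PySem.Set.add, PySem.Set.contains] at *
      rw [if_neg hca]
      simp only [List.contains_iff_mem, List.mem_append, List.mem_singleton] at *
      constructor
      · rintro (hx | hx)
        · exact Or.inl ((hinv x).mp (by simpa [List.contains_iff_mem] using hx))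
        · exact Or.inr hx
      · rintro (hx | hx)
        · exact Or.inl (by simpa [List.contains_iff_mem] using (hinv x).mpr hx)
        · exact Or.inr hx

theorem foldl_add_eq_dApp (rest : List String) :
    ∀ cur : List String, rest.foldl PySem.Set.add cur = dApp cur rest := by
  induction rest with
  | nil => intro cur; rfl
  | cons a r ih =>
    intro cur
    simp only [List.foldl_cons, dApp]
    have : PySem.Set.add cur a = if a ∈ cur then cur else cur ++ [a] := by
      simp only [PySem.Set.add, PySem.Set.contains]
      by_cases hm : a ∈ cur
      · rw [if_pos (by simpa [List.contains_iff_mem] using hm), if_pos hm]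
      · rw [if_neg (by simpa [List.contains_iff_mem] using hm), if_neg hm]
    rw [this]
    by_cases hm : a ∈ cur
    · rw [if_pos hm]; exact ih cur
    · rw [if_neg hm]; exact ih (cur ++ [a])

theorem dedup_eq_dApp (s : String) (rest : List String) :
    PySem.List.dedup (s :: rest) = dApp [s] rest := by
  rw [PySem.List.dedup_eq_ofList, PySem.Set.ofList_eq_foldl, List.foldl_cons]
  have : PySem.Set.add [] s = [s] := rfl
  rw [this, foldl_add_eq_dApp]

-- merge phase = pair fold over the flattened items
theorem merge_eq_pst (items : List (String × List String)) :
    ∀ d : PySem.Dict String (List String),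
      d.keys.Nodup → (∀ pr ∈ items, pr.2 ≠ []) →
      items.foldl
        (fun (d : PySem.Dict String (List String)) pr =>
          match d.get? pr.1 with
          | some lst => d.insert pr.1 (pvDedupInto (PySem.Set.ofList lst) lst pr.2)
          | none     => d.insert pr.1 (PySem.List.dedup pr.2)) d
      = (flatPairs items).foldl pst d := by
  induction items with
  | nil => intro d _ _; rfl
  | cons x t ih =>
    intro d hnd hne
    obtain ⟨p, ss⟩ := x
    have hss : ss ≠ [] := hne (p, ss) List.mem_cons_self
    have hflat : flatPairs ((p, ss) :: t) = ss.map (fun s => (p, s)) ++ flatPairs t := by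
      simp [flatPairs]
    rw [hflat, List.foldl_append, List.foldl_cons]
    have hhead :
        (match d.get? p with
          | some lst => d.insert p (pvDedupInto (PySem.Set.ofList lst) lst ss)
          | none     => d.insert p (PySem.List.dedup ss))
        = (ss.map (fun s => (p, s))).foldl pst d := by
      rcases hget : d.get? p with _ | lst
      · obtain ⟨a, r, rfl⟩ := List.exists_cons_of_ne_nil hss
        have h1 : pst d (p, a) = d.insert p [a] := pst_of_none d (p, a) hget
        simp only [List.map_cons, List.foldl_cons, h1]
        rw [pst_block_eq_insert r p (d.insert p [a]) [a]
              (PySem.Dict.nodup_keys_insert _ _ _ hnd) (PySem.Dict.get?_insert_self _ _ _),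
            PySem.Dict.insert_insert_self, dedup_eq_dApp]
      · simp only
        rw [pst_block_eq_insert ss p d lst hnd hget]
        congr 1
        refine dedupInto_eq_dApp ss (PySem.Set.ofList lst) lst ?_
        intro x
        simp only [PySem.Set.contains, List.contains_iff_mem]
        exact PySem.Set.mem_ofList lst x
    rw [hhead]
    refine ih _ ?_ ?_
    · exact nodup_keys_foldl_pst _ d hnd
    · exact fun pr hpr => hne pr (List.mem_cons_of_mem _ hpr)

-- core reordering: grouping the pairs key-major does not change the pst fold
theorem core_reorder (n : Nat) :
    ∀ (l : List (String × String)) (d : PySem.Dict String (List String)),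
      l.length ≤ n → d.keys.Nodup →
      (flatPairs (l.foldl gst PySem.Dict.empty).items).foldl pst d = l.foldl pst d := by
  induction n with
  | zero =>
    intro l d hlen _
    rw [List.eq_nil_of_length_eq_zero (Nat.le_zero.mp hlen)]
    rfl
  | succ n ih =>
    intro l d hlen hnd
    rcases l with _ | ⟨⟨p, s⟩, l'⟩
    · rfl
    · rw [List.foldl_cons, List.foldl_cons]
      have hstart : gst PySem.Dict.empty (p, s) = PySem.Dict.mk ((p, [s]) :: PySem.Dict.empty.items) := rfl
      rw [hstart, gather_head l' p PySem.Dict.empty [s] (by simp [PySem.Dict.keys, PySem.Dict.empty])]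
      have hmapid : ((l'.filter (fun x => x.1 == p)).map Prod.snd).map (fun s => (p, s))
          = l'.filter (fun x => x.1 == p) := by
        rw [List.map_map]
        calc (l'.filter (fun x => x.1 == p)).map ((fun s => (p, s)) ∘ Prod.snd)
            = (l'.filter (fun x => x.1 == p)).map (fun x => x) := by
              apply List.map_congr_left
              intro x hx
              have : x.1 = p := by simpa using (List.mem_filter.mp hx).2
              simp only [Function.comp_apply]
              rw [← this]
          _ = _ := by simp
      have hflat : flatPairs ((p, [s] ++ (l'.filter (fun x => x.1 == p)).map Prod.snd)
            :: ((l'.filter (fun x => !(x.1 == p))).foldl gst PySem.Dict.empty).items)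
          = ((p, s) :: l'.filter (fun x => x.1 == p))
            ++ flatPairs ((l'.filter (fun x => !(x.1 == p))).foldl gst PySem.Dict.empty).items := by
        simp only [flatPairs, List.flatMap_cons, List.map_append, List.map_cons, List.map_nil,
          hmapid]
        rfl
      rw [show (PySem.Dict.mk ((p, [s] ++ (l'.filter (fun x => x.1 == p)).map Prod.snd)
            :: ((l'.filter (fun x => !(x.1 == p))).foldl gst PySem.Dict.empty).items)).items
          = ((p, [s] ++ (l'.filter (fun x => x.1 == p)).map Prod.snd)
            :: ((l'.filter (fun x => !(x.1 == p))).foldl gst PySem.Dict.empty).items) from rfl]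
      rw [hflat, List.foldl_append, List.foldl_cons]
      have hlen' : (l'.filter (fun x => !(x.1 == p))).length ≤ n :=
        le_trans (List.length_filter_le _ _) (Nat.le_of_succ_le_succ hlen)
      rw [ih _ _ hlen' (nodup_keys_foldl_pst _ _ (nodup_keys_pst d (p, s) hnd))]
      exact (pst_partition l' p (pst d (p, s)) (mem_keys_pst_self d (p, s))).symm

-- ===== VERDICT (by name: the statement is the Claim_ definition above) =====
theorem makingkb_spec : Claim_equal_makingkb := by
  intro kb dc _ hpre
  unfold Spec_makingkb makingkb_alt
  rw [makingkb_eq_pst]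
  simp only [foldG_eq_gst]
  have hnd : (PySem.Dict.mk dc).keys.Nodup := by
    simpa [PySem.Dict.keys] using hpre
  rw [merge_eq_pst _ _ hnd
      (gather_values_nonempty _ PySem.Dict.empty (fun pr hpr => absurd hpr (by simp [PySem.Dict.empty])))]
  rw [core_reorder (pairsOf kb).length _ _ le_rfl hnd]
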